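-- pv_equiv track=rewrite | github.com/JUkhan/flask_react_app | api/gen_sql/schema.py | filter_schemas_by_table_names
-- ===== SOURCE A (Python) =====
-- def filter_schemas_by_table_names(table_names_str, schemas):
--     """
--     Filter schemas to include only those that match the specified table names.
--
--     Args:
--         table_names_str (str): Comma-separated list of table names
--         schemas (str): A string containing schema definitions
--
--     Returns:
--         str: Filtered schemas containing only the specified tables
--     """
--     # Convert comma-separated string to list and strip whitespace
--     table_names = [name.strip() for name in table_names_str.split(',')]
--
--     if(len(table_names)>20): return ''
--     # Split the schemas into individual table definitions
--     schema_lines = schemas.split('\n')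
--
--     filtered_schema = []
--     include_current_table = False
--     current_table_name = None
--
--     for line in schema_lines:
--         # Check if line defines a new table
--         if line.strip().lower().startswith('table:'):
--             # Extract the table name
--             current_table_name = line.strip()[6:].strip()
--             # Determine if this table should be included
--             include_current_table = current_table_name in table_names
--
--             # Add a newline before a new table definition (except for the first one)
--             if include_current_table and filtered_schema and filtered_schema[-1].strip():
--                 filtered_schema.append("")
--
--         # Include line if it belongs to a table we want to keep
--         if include_current_table and line.strip():
--             filtered_schema.append(line)
--
--     # Join the lines back together
--     return '\n'.join(filtered_schema)
-- ===== SOURCE B (Python) =====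
-- def filter_schemas_by_table_names(table_names_str, schemas):
--     """Block-wise reimplementation: parse schemas into table blocks, keep the
--     named ones, render each block's non-blank lines, join with blank lines."""
--     table_names = [name.strip() for name in table_names_str.split(',')]
--     if len(table_names) > 20:
--         return ''
--
--     # Parse into (name, body) blocks; lines before the first header belong to no block.
--     blocks = []
--     cur_name = None
--     cur_body = []
--     for line in schemas.split('\n'):
--         stripped = line.strip()
--         if stripped.lower().startswith('table:'):
--             if cur_name is not None:
--                 blocks.append((cur_name, cur_body))
--             cur_name = stripped[6:].strip()
--             cur_body = []
--         if cur_name is not None: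
--             cur_body.append(line)
--     if cur_name is not None:
--         blocks.append((cur_name, cur_body))
--
--     kept = ['\n'.join(l for l in body if l.strip())
--             for name, body in blocks if name in table_names]
--     return '\n\n'.join(kept)
-- ===== Notes on version B (the rewrite author's own statement) =====
-- stated objective: alternative
-- what changed: A streams the lines through one stateful include-flag loop that interleaves separator insertion with output; B first parses the schema text into (table-name, body) blocks, then filters the blocks by name and renders the kept blocks' non-blank lines joined with '\n\n'.
import Mathlib
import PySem

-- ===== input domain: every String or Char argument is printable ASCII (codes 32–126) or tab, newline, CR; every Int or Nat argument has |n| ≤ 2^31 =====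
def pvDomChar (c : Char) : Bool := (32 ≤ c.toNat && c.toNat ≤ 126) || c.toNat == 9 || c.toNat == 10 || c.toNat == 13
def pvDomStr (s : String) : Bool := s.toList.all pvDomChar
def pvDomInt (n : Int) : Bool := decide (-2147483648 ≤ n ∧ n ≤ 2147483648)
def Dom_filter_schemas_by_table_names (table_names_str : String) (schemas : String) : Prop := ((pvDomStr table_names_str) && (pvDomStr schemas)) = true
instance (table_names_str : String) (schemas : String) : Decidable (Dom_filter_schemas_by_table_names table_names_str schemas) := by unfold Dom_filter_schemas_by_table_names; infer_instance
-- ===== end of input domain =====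

-- B parses the schema into named table blocks and renders the kept blocks, instead of A's
-- single stateful include-flag streaming loop; same return value, no speed claim.

-- ===== PORT A =====
-- A's loop body: on a header line recompute the include flag, possibly emit a separator
-- blank line, and append the (non-blank) line when the current table is included.
def pvAStep (table_names : List (List Char)) (st : List (List Char) × Bool) (line : List Char) :
    List (List Char) × Bool :=
  if PySem.Chars.startswith (PySem.Chars.lower (PySem.Chars.strip line)) ['t','a','b','l','e',':'] then
    let current_table_name := PySem.Chars.strip (PySem.Chars.slice (PySem.Chars.strip line) (some 6) none)
    let include_current := decide (current_table_name ∈ table_names)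
    -- "if include_current_table and filtered_schema and filtered_schema[-1].strip(): append('')"
    let acc := if include_current && !st.1.isEmpty && !(PySem.Chars.strip (st.1.getLastD [])).isEmpty
               then st.1 ++ [[]] else st.1
    (if include_current && !(PySem.Chars.strip line).isEmpty then acc ++ [line] else acc, include_current)
  else
    (if st.2 && !(PySem.Chars.strip line).isEmpty then st.1 ++ [line] else st.1, st.2)

def filter_schemas_by_table_names (table_names_str : String) (schemas : String) : String :=
  let table_names := (PySem.Chars.splitOn table_names_str.toList [',']).map PySem.Chars.strip
  if table_names.length > 20 then "" else
  String.ofList (PySem.Chars.join ['\n']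
    ((PySem.Chars.splitOn schemas.toList ['\n']).foldl (pvAStep table_names) ([], false)).1)

-- ===== PORT B =====
-- close the current block (if any) onto the block list
def pvFlush (blocks : List (List Char × List (List Char))) (nm : Option (List Char))
    (body : List (List Char)) : List (List Char × List (List Char)) :=
  match nm with
  | some n => blocks ++ [(n, body)]
  | none => blocks

-- B's parser step: a header line closes the current block and opens a new one; every line
-- (header included) is appended to the current block's body when one is open.
def pvBStep (st : List (List Char × List (List Char)) × Option (List Char) × List (List Char))
    (line : List Char) :
    List (List Char × List (List Char)) × Option (List Char) × List (List Char) :=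
  let stripped := PySem.Chars.strip line
  let st' :=
    if PySem.Chars.startswith (PySem.Chars.lower stripped) ['t','a','b','l','e',':'] then
      (pvFlush st.1 st.2.1 st.2.2,
       some (PySem.Chars.strip (PySem.Chars.slice stripped (some 6) none)),
       ([] : List (List Char)))
    else st
  match st'.2.1 with
  | some _ => (st'.1, st'.2.1, st'.2.2 ++ [line])
  | none => st'

def filter_schemas_by_table_names_alt (table_names_str : String) (schemas : String) : String :=
  let table_names := (PySem.Chars.splitOn table_names_str.toList [',']).map PySem.Chars.strip
  if table_names.length > 20 then "" else
  let st := (PySem.Chars.splitOn schemas.toList ['\n']).foldl pvBStep ([], none, [])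
  let blocks := pvFlush st.1 st.2.1 st.2.2
  let kept := (blocks.filter (fun b => decide (b.1 ∈ table_names))).map
    (fun b => PySem.Chars.join ['\n'] (b.2.filter (fun l => !(PySem.Chars.strip l).isEmpty)))
  String.ofList (PySem.Chars.join ['\n','\n'] kept)

-- ===== PRECONDITION & SPEC =====
def Spec_filter_schemas_by_table_names (table_names_str : String) (schemas : String) (out : String) : Prop := out = filter_schemas_by_table_names_alt table_names_str schemas
instance (table_names_str : String) (schemas : String) (out : String) : Decidable (Spec_filter_schemas_by_table_names table_names_str schemas out) := by unfold Spec_filter_schemas_by_table_names; infer_instance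

-- ===== CLAIM (what is proved, stated in full; the proofs are below) =====
def Claim_equal_filter_schemas_by_table_names : Prop := ∀ (table_names_str : String) (schemas : String), Dom_filter_schemas_by_table_names table_names_str schemas → Spec_filter_schemas_by_table_names table_names_str schemas (filter_schemas_by_table_names table_names_str schemas)

-- ===== LEMMAS AND PROOFS =====

-- proof-side vocabulary
def pvRender (b : List Char × List (List Char)) : List (List Char) :=
  b.2.filter (fun l => !(PySem.Chars.strip l).isEmpty)

def pvKept (names : List (List Char)) (bs : List (List Char × List (List Char))) :
    List (List (List Char)) :=
  (bs.filter (fun b => decide (b.1 ∈ names))).map pvRender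

def pvStep (acc : List (List Char)) (r : List (List Char)) : List (List Char) :=
  (if acc.isEmpty then acc else acc ++ [[]]) ++ r

def pvFlat (rs : List (List (List Char))) : List (List Char) := rs.foldl pvStep []

def pvInc (names : List (List Char)) (nm : Option (List Char)) : Bool :=
  match nm with
  | some n => decide (n ∈ names)
  | none => false

-- a header line is non-blank
lemma pvHdr_nonblank (l : List Char)
    (h : PySem.Chars.startswith (PySem.Chars.lower (PySem.Chars.strip l)) ['t','a','b','l','e',':'] = true) :
    (!(PySem.Chars.strip l).isEmpty) = true := by
  cases hs : PySem.Chars.strip l with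
  | nil => rw [hs] at h; simp [PySem.Chars.lower, PySem.Chars.startswith] at h
  | cons a t => simp

lemma pvGetLastD_append (r : List (List Char)) (hr : r ≠ []) (d : List Char) (a : List (List Char)) :
    (a ++ r).getLastD d = r.getLastD d := by
  cases r with
  | nil => simp at hr
  | cons x t =>
    simp only [List.getLastD_eq_getLast?, List.getLast?_append]
    cases h : (x::t).getLast? with
    | none => simp at h
    | some y => simp

lemma pvGetLastD_mem (r : List (List Char)) (hr : r ≠ []) : r.getLastD [] ∈ r := by
  cases r with
  | nil => simp at hr
  | cons x t =>
    have := List.getLast_mem (l := x::t) (by simp)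
    simp [List.getLastD_eq_getLast?, List.getLast?_eq_some_getLast, this]

-- flat of one more render
lemma pvFlat_append (rs : List (List (List Char))) (r : List (List Char)) :
    pvFlat (rs ++ [r]) = pvStep (pvFlat rs) r := by
  simp [pvFlat, List.foldl_append]

-- every line of pvFlat (pvKept …) invariant: empty, or the last line is non-blank
lemma pvFlat_last (rs : List (List (List Char)))
    (h : ∀ r ∈ rs, r ≠ [] ∧ ∀ l ∈ r, (!(PySem.Chars.strip l).isEmpty) = true) :
    pvFlat rs = [] ∨ (pvFlat rs ≠ [] ∧ (!(PySem.Chars.strip ((pvFlat rs).getLastD [])).isEmpty) = true) := by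
  rcases rs.eq_nil_or_concat with rfl | ⟨rs', r, rfl⟩
  · left; rfl
  · obtain ⟨hne, hall⟩ := h r (by simp)
    right
    rw [List.concat_eq_append, pvFlat_append]
    unfold pvStep
    constructor
    · simp [hne]
    · rw [pvGetLastD_append r hne]
      exact hall _ (pvGetLastD_mem r hne)

-- pvKept over one appended block
lemma pvKept_append (names : List (List Char)) (bs : List (List Char × List (List Char)))
    (b : List Char × List (List Char)) :
    pvKept names (bs ++ [b])
      = pvKept names bs ++ (if decide (b.1 ∈ names) = true then [pvRender b] else []) := by
  unfold pvKept
  rw [List.filter_append]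
  split_ifs with h <;> simp [h]

-- each kept rendering is non-empty with only non-blank lines
lemma pvKept_prop (names : List (List Char)) (bs : List (List Char × List (List Char)))
    (hb : ∀ b ∈ bs, pvRender b ≠ []) :
    ∀ r ∈ pvKept names bs, r ≠ [] ∧ ∀ l ∈ r, (!(PySem.Chars.strip l).isEmpty) = true := by
  intro r hr
  simp only [pvKept, List.mem_map, List.mem_filter] at hr
  obtain ⟨b, ⟨hbmem, _⟩, rfl⟩ := hr
  refine ⟨hb b hbmem, ?_⟩
  intro l hl
  simp only [pvRender, List.mem_filter] at hl
  exact hl.2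

lemma pvFlush_some (bs : List (List Char × List (List Char))) (n : List Char)
    (body : List (List Char)) : pvFlush bs (some n) body = bs ++ [(n, body)] := rfl

-- pvBStep equations
lemma pvBStep_hdr (blocks : List (List Char × List (List Char))) (nm : Option (List Char))
    (body : List (List Char)) (line : List Char)
    (hh : PySem.Chars.startswith (PySem.Chars.lower (PySem.Chars.strip line)) ['t','a','b','l','e',':'] = true) :
    pvBStep (blocks, nm, body) line
      = (pvFlush blocks nm body,
         some (PySem.Chars.strip (PySem.Chars.slice (PySem.Chars.strip line) (some 6) none)), [line]) := by
  simp [pvBStep, hh]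

lemma pvBStep_nh_none (blocks : List (List Char × List (List Char))) (body : List (List Char))
    (line : List Char)
    (hh : PySem.Chars.startswith (PySem.Chars.lower (PySem.Chars.strip line)) ['t','a','b','l','e',':'] = false) :
    pvBStep (blocks, none, body) line = (blocks, none, body) := by
  simp [pvBStep, hh]

lemma pvBStep_nh_some (blocks : List (List Char × List (List Char))) (n : List Char)
    (body : List (List Char)) (line : List Char)
    (hh : PySem.Chars.startswith (PySem.Chars.lower (PySem.Chars.strip line)) ['t','a','b','l','e',':'] = false) :
    pvBStep (blocks, some n, body) line = (blocks, some n, body ++ [line]) := by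
  simp [pvBStep, hh]

-- one step of A simulates one step of B, through the rendering
lemma pvStep_sim (names : List (List Char)) (blocks : List (List Char × List (List Char)))
    (nm : Option (List Char)) (body : List (List Char)) (line : List Char)
    (hb : ∀ b ∈ pvFlush blocks nm body, pvRender b ≠ []) :
    pvAStep names (pvFlat (pvKept names (pvFlush blocks nm body)), pvInc names nm) line
      = (pvFlat (pvKept names
           (pvFlush (pvBStep (blocks, nm, body) line).1 (pvBStep (blocks, nm, body) line).2.1
             (pvBStep (blocks, nm, body) line).2.2)),
         pvInc names (pvBStep (blocks, nm, body) line).2.1) := by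
  by_cases hh : PySem.Chars.startswith (PySem.Chars.lower (PySem.Chars.strip line)) ['t','a','b','l','e',':'] = true
  · rw [pvBStep_hdr blocks nm body line hh]
    have hnb := pvHdr_nonblank line hh
    by_cases hin : PySem.Chars.strip (PySem.List.slice (PySem.Chars.strip line) (some 6) none) ∈ names
    · rcases pvFlat_last _ (pvKept_prop names _ hb) with hF | ⟨hFne, hFlast⟩
      · simp [pvAStep, hh, pvInc, hin, hF, pvFlush_some, pvKept_append, pvRender, hnb,
          pvFlat_append, pvStep]
      · have hFe : (pvFlat (pvKept names (pvFlush blocks nm body))).isEmpty = false := by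
          cases hq : pvFlat (pvKept names (pvFlush blocks nm body)) with
          | nil => exact absurd hq hFne
          | cons a t => rfl
        have hlast' : ¬ PySem.Chars.strip
            ((pvFlat (pvKept names (pvFlush blocks nm body))).getLast?.getD []) = [] := by
          rw [← List.getLastD_eq_getLast?]
          intro hx
          rw [hx] at hFlast
          simp at hFlast
        simp [pvAStep, hh, pvInc, hin, hFe, hlast', pvFlush_some, pvKept_append, pvRender, hnb,
          pvFlat_append, pvStep]
    · simp [pvAStep, hh, pvInc, hin, pvFlush_some, pvKept_append]
  · rw [Bool.not_eq_true] at hh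
    cases nm with
    | none =>
      rw [pvBStep_nh_none blocks body line hh]
      simp [pvAStep, hh, pvInc]
    | some n =>
      rw [pvBStep_nh_some blocks n body line hh]
      by_cases hin : n ∈ names
      · by_cases hnb : (!(PySem.Chars.strip line).isEmpty) = true
        · simp [pvAStep, hh, pvInc, hin, hnb, pvFlush_some, pvKept_append, pvRender,
            List.filter_append, pvFlat_append, pvStep, List.append_assoc]
        · rw [Bool.not_eq_true] at hnb
          simp [pvAStep, hh, pvInc, hin, hnb, pvFlush_some, pvKept_append, pvRender,
            List.filter_append, pvFlat_append, pvStep]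
      · simp [pvAStep, hh, pvInc, hin, pvFlush_some, pvKept_append]

-- the block invariant is preserved
lemma pvHb_pres (blocks : List (List Char × List (List Char))) (nm : Option (List Char))
    (body : List (List Char)) (line : List Char)
    (hb : ∀ b ∈ pvFlush blocks nm body, pvRender b ≠ []) :
    ∀ b ∈ pvFlush (pvBStep (blocks, nm, body) line).1 (pvBStep (blocks, nm, body) line).2.1
        (pvBStep (blocks, nm, body) line).2.2,
      pvRender b ≠ [] := by
  by_cases hh : PySem.Chars.startswith (PySem.Chars.lower (PySem.Chars.strip line)) ['t','a','b','l','e',':'] = true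
  · rw [pvBStep_hdr blocks nm body line hh]
    have hnb := pvHdr_nonblank line hh
    intro b hbm
    simp only [pvFlush, List.mem_append, List.mem_singleton] at hbm
    rcases hbm with hbm | rfl
    · exact hb b hbm
    · simp [pvRender, hnb]
  · rw [Bool.not_eq_true] at hh
    cases nm with
    | none =>
      rw [pvBStep_nh_none blocks body line hh]
      exact hb
    | some n =>
      rw [pvBStep_nh_some blocks n body line hh]
      intro b hbm
      simp only [pvFlush, List.mem_append, List.mem_singleton] at hbm
      rcases hbm with hbm | rfl
      · exact hb b (by simp [pvFlush, hbm])
      · have := hb (n, body) (by simp [pvFlush])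
        simp only [pvRender, List.filter_append] at this ⊢
        simp [this]

-- the whole loops simulate
lemma pvLoop_sim (names : List (List Char)) (L : List (List Char))
    (blocks : List (List Char × List (List Char))) (nm : Option (List Char))
    (body : List (List Char))
    (hb : ∀ b ∈ pvFlush blocks nm body, pvRender b ≠ []) :
    (L.foldl (pvAStep names) (pvFlat (pvKept names (pvFlush blocks nm body)), pvInc names nm)).1
      = pvFlat (pvKept names
          (pvFlush (L.foldl pvBStep (blocks, nm, body)).1 (L.foldl pvBStep (blocks, nm, body)).2.1
            (L.foldl pvBStep (blocks, nm, body)).2.2)) := by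
  induction L generalizing blocks nm body with
  | nil => rfl
  | cons l L ih =>
    rw [List.foldl_cons, List.foldl_cons, pvStep_sim names blocks nm body l hb]
    exact ih (pvBStep (blocks, nm, body) l).1 (pvBStep (blocks, nm, body) l).2.1
      (pvBStep (blocks, nm, body) l).2.2 (pvHb_pres blocks nm body l hb)

-- final blocks all have a non-empty render
lemma pvHb_loop (L : List (List Char)) (blocks : List (List Char × List (List Char)))
    (nm : Option (List Char)) (body : List (List Char))
    (hb : ∀ b ∈ pvFlush blocks nm body, pvRender b ≠ []) :
    ∀ b ∈ pvFlush (L.foldl pvBStep (blocks, nm, body)).1 (L.foldl pvBStep (blocks, nm, body)).2.1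
        (L.foldl pvBStep (blocks, nm, body)).2.2,
      pvRender b ≠ [] := by
  induction L generalizing blocks nm body with
  | nil => exact hb
  | cons l L ih =>
    rw [List.foldl_cons]
    exact ih (pvBStep (blocks, nm, body) l).1 (pvBStep (blocks, nm, body) l).2.1
      (pvBStep (blocks, nm, body) l).2.2 (pvHb_pres blocks nm body l hb)

-- join over a split list of chunks
lemma pvJoin_append (sep : List Char) (xs ys : List (List Char)) (hx : xs ≠ []) (hy : ys ≠ []) :
    PySem.Chars.join sep (xs ++ ys) = PySem.Chars.join sep xs ++ sep ++ PySem.Chars.join sep ys := by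
  induction xs with
  | nil => exact absurd rfl hx
  | cons x xs ih =>
    cases xs with
    | nil =>
      cases ys with
      | nil => exact absurd rfl hy
      | cons y t => simp [PySem.Chars.join_cons_cons, PySem.Chars.join_singleton]
    | cons x2 t2 =>
      rw [List.cons_append, List.cons_append,
        PySem.Chars.join_cons_cons sep x x2 (t2 ++ ys), PySem.Chars.join_cons_cons,
        ← List.cons_append, ih (by simp)]
      simp [List.append_assoc]

-- a flat rendering of non-empty renders is non-empty
lemma pvFlat_ne (rs : List (List (List Char))) (hrs : rs ≠ []) (h : ∀ r ∈ rs, r ≠ []) :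
    pvFlat rs ≠ [] := by
  rcases rs.eq_nil_or_concat with rfl | ⟨rs', r, rfl⟩
  · exact absurd rfl hrs
  · rw [List.concat_eq_append, pvFlat_append]
    have := h r (by simp)
    simp [pvStep, this]

-- joining the flat rendering with '\n' equals joining the per-block renderings with '\n\n'
lemma pvJoin_flat (rs : List (List (List Char))) (h : ∀ r ∈ rs, r ≠ []) :
    PySem.Chars.join ['\n'] (pvFlat rs)
      = PySem.Chars.join ['\n','\n'] (rs.map (PySem.Chars.join ['\n'])) := by
  induction rs using List.reverseRecOn with
  | nil => rfl
  | append_singleton rs r ih =>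
    have hr : r ≠ [] := h r (by simp)
    rcases eq_or_ne rs [] with rfl | hrs
    · simp only [List.nil_append, pvFlat, List.foldl_cons, List.foldl_nil, pvStep,
        List.isEmpty_nil, if_true, List.map_cons, List.map_nil]
      rw [PySem.Chars.join_singleton]
    · have hall : ∀ x ∈ rs, x ≠ [] := fun x hx => h x (by simp [hx])
      have hFne := pvFlat_ne rs hrs hall
      rw [pvFlat_append]
      have hFe : (pvFlat rs).isEmpty = false := by
        cases hq : pvFlat rs with
        | nil => exact absurd hq hFne
        | cons a t => rfl
      rw [pvStep]
      rw [hFe]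
      simp only [Bool.false_eq_true, if_false]
      rw [pvJoin_append ['\n'] (pvFlat rs ++ [[]]) r (by simp) hr,
        pvJoin_append ['\n'] (pvFlat rs) [[]] hFne (by simp),
        PySem.Chars.join_singleton, List.map_append, List.map_singleton,
        pvJoin_append ['\n','\n'] (rs.map (PySem.Chars.join ['\n'])) [PySem.Chars.join ['\n'] r]
          (by simpa using hrs) (by simp),
        PySem.Chars.join_singleton, ih hall]
      simp [List.append_assoc]

-- ===== VERDICT (by name: the statement is the Claim_ definition above) =====
theorem filter_schemas_by_table_names_spec : Claim_equal_filter_schemas_by_table_names := by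
  intro t s _
  unfold Spec_filter_schemas_by_table_names
  unfold filter_schemas_by_table_names filter_schemas_by_table_names_alt
  by_cases h20 : ((PySem.Chars.splitOn t.toList [',']).map PySem.Chars.strip).length > 20
  · simp only [h20, if_true]
  · simp only [h20, if_false]
    have hb0 : ∀ b ∈ pvFlush ([] : List (List Char × List (List Char))) none [], pvRender b ≠ [] := by
      intro b hbm; simp [pvFlush] at hbm
    have hsim := pvLoop_sim ((PySem.Chars.splitOn t.toList [',']).map PySem.Chars.strip)
      (PySem.Chars.splitOn s.toList ['\n']) [] none [] hb0
    have hfin := pvHb_loop (PySem.Chars.splitOn s.toList ['\n']) [] none [] hb0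
    have hkmap : ∀ (names : List (List Char)) (bs : List (List Char × List (List Char))),
        (bs.filter (fun b => decide (b.1 ∈ names))).map
            (fun b => PySem.Chars.join ['\n'] (b.2.filter (fun l => !(PySem.Chars.strip l).isEmpty)))
          = (pvKept names bs).map (PySem.Chars.join ['\n']) := by
      intro names bs
      unfold pvKept
      rw [List.map_map]
      rfl
    rw [show pvFlat (pvKept ((PySem.Chars.splitOn t.toList [',']).map PySem.Chars.strip)
        (pvFlush [] none [])) = [] from rfl,
      show pvInc ((PySem.Chars.splitOn t.toList [',']).map PySem.Chars.strip) none = false from rfl]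
      at hsim
    rw [hsim, hkmap, pvJoin_flat _ (fun r hr => (pvKept_prop _ _ hfin r hr).1)]
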